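-- pv_equiv track=rewrite | github.com/GABallena/Investigations | biological_kmers.py | detect_pseudogene_features
-- ===== SOURCE A (Python) =====
-- def detect_pseudogene_features(sequence):
--     """Detect features indicative of pseudogenization"""
--     features = []
--
--     # Look for premature stop codons
--     for i in range(0, len(sequence)-2, 3):
--         codon = sequence[i:i+3]
--         if codon in ['TAA', 'TAG', 'TGA']:
--             features.append(('premature_stop', i))
--
--     # Look for frameshift mutations
--     for i in range(len(sequence)-3):
--         if sequence[i:i+3] in ['ATG']:  # Start codon
--             frame_shifts = check_frame_shifts(sequence[i:])
--             features.extend([('frameshift', i+pos) for pos in frame_shifts])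
--
--     return features
--
-- def check_frame_shifts(seq):
--     """Check for potential frameshift mutations"""
--     shifts = []
--     canonical_length = len(seq) - (len(seq) % 3)
--
--     for i in range(0, canonical_length-3, 3):
--         codon = seq[i:i+3]
--         next_codon = seq[i+3:i+6]
--
--         # Check for insertions/deletions that disrupt reading frame
--         if codon in ['ATG', 'GTG'] and next_codon not in ['ATG', 'GTG']:
--             if any(base not in 'ATGC' for base in next_codon):
--                 shifts.append(i+3)
--
--     return shifts
-- ===== SOURCE B (Python) =====
-- def detect_pseudogene_features(sequence):
--     """Detect features indicative of pseudogenization (find()-driven single-pass precomputation)."""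
--     n = len(sequence)
--     stops = {'TAA', 'TAG', 'TGA'}
--     frames = {'ATG', 'GTG'}
--     features = [('premature_stop', i)
--                 for i in range(0, n - 2, 3) if sequence[i:i+3] in stops]
--
--     def occurrences(sub):
--         out = []
--         pos = sequence.find(sub)
--         while pos != -1:
--             out.append(pos)
--             pos = sequence.find(sub, pos + 1)
--         return out
--
--     # A start codon at i contributes ('frameshift', p+3) for every p >= i with
--     # p ≡ i (mod 3), p+6 <= n - (n-p) % 3, sequence[p:p+3] in frames,
--     # sequence[p+3:p+6] not in frames and containing a non-ACGT base.
--     # Precompute those "bad transition" positions once, per residue class mod 3.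
--     atg = occurrences('ATG')
--     good = [[], [], []]
--     for p in sorted(atg + occurrences('GTG')):
--         if p + 6 <= n - (n - p) % 3:
--             nxt = sequence[p+3:p+6]
--             if nxt not in frames and any(b not in 'ATGC' for b in nxt):
--                 good[p % 3].append(p)
--
--     ptr = [0, 0, 0]
--     for i in atg:
--         if i < n - 3:
--             r = i % 3
--             g = good[r]
--             k = ptr[r]
--             while k < len(g) and g[k] < i:
--                 k += 1
--             ptr[r] = k
--             features.extend(('frameshift', p + 3) for p in g[k:])
--     return features
-- ===== Notes on version B (the rewrite author's own statement) =====
-- stated objective: faster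
-- what changed: A re-scans the whole suffix after every start codon (check_frame_shifts per ATG) and slices every position; B locates ATG/GTG occurrences once with C-level str.find, precomputes the bad-frame-transition positions per residue class mod 3 in one pass, and emits each start codon's frameshifts as a precomputed suffix past a monotone pointer.
import Mathlib
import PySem

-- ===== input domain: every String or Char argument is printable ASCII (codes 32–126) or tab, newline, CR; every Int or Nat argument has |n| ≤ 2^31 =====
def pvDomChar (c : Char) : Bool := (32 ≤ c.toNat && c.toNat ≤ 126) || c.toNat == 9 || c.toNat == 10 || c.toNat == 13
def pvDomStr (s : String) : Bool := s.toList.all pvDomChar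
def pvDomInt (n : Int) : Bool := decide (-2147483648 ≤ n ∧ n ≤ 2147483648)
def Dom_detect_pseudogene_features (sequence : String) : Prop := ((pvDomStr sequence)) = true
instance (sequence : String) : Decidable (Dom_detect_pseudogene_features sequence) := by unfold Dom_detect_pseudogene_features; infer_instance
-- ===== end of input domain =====

-- B locates the frame codons once with the find() loop, precomputes the "bad frame transition"
-- positions per residue class mod 3, and for each start codon emits the precomputed suffix via a
-- monotone pointer, instead of A's re-scan of the whole suffix after every start codon.

-- ===== PORT A =====

/-- range(a, stop, 3) over Nat (a Python stop < 0 maps to Nat 0: the same empty range). -/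
def upto3 (a stop : Nat) : List Nat :=
  if a < stop then a :: upto3 (a + 3) stop else []
termination_by stop - a

/-- s[p:p+3] for a nonnegative index p (Python slices and take/drop clamp identically here). -/
def cdn (l : List Char) (p : Nat) : List Char := (l.drop p).take 3

def stopCodons : List (List Char) := [['T','A','A'], ['T','A','G'], ['T','G','A']]
def startLike : List (List Char) := [['A','T','G'], ['G','T','G']]

def check_frame_shifts (s : List Char) : List Nat :=
  let canonical := s.length - s.length % 3
  (upto3 0 (canonical - 3)).foldl (fun shifts i =>
    if cdn s i ∈ startLike ∧ cdn s (i + 3) ∉ startLike then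
      if (cdn s (i + 3)).any (fun b => decide (b ∉ ['A','T','G','C'])) then shifts ++ [i + 3]
      else shifts
    else shifts) []

def detect_pseudogene_features (sequence : String) : List (String × Int) :=
  let l := sequence.toList
  let n := l.length
  let feats := (upto3 0 (n - 2)).foldl (fun fs i =>
    if cdn l i ∈ stopCodons then fs ++ [("premature_stop", (i : Int))] else fs) []
  (List.range (n - 3)).foldl (fun fs i =>
    if cdn l i ∈ [['A','T','G']] then
      fs ++ (check_frame_shifts (l.drop i)).map (fun pos => ("frameshift", ((i + pos : Nat) : Int)))
    else fs) feats

-- ===== PORT B =====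

/-- The find/while loop of B: all start positions of sub in s, in order.  The fuel argument only
    makes the recursion structurally total; called with s.length + 1 it never runs out. -/
def occLoop (s sub : List Char) (pos : Int) : Nat → List Nat
  | 0 => []
  | fuel + 1 =>
    if pos = -1 then []
    else pos.toNat :: occLoop s sub (PySem.Chars.findFrom s sub (pos + 1)) fuel

def occurrences (s sub : List Char) : List Nat :=
  occLoop s sub (PySem.Chars.find s sub) (s.length + 1)

/-- One step of B's precomputation pass over the found frame-codon positions: record p in its
    residue class mod 3 when the next codon is a bad transition inside the canonical region. -/
def goodStep2 (l : List Char) (n : Nat) (g : List Nat × List Nat × List Nat) (p : Nat) :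
    List Nat × List Nat × List Nat :=
  if p + 6 ≤ n - (n - p) % 3 then
    if cdn l (p + 3) ∉ startLike ∧ (cdn l (p + 3)).any (fun b => decide (b ∉ ['A','T','G','C'])) then
      if p % 3 = 0 then (g.1 ++ [p], g.2.1, g.2.2)
      else if p % 3 = 1 then (g.1, g.2.1 ++ [p], g.2.2)
      else (g.1, g.2.1, g.2.2 ++ [p])
    else g
  else g

/-- One start codon at i: advance the pointer of class i % 3 (dropWhile = the while loop over the
    monotone pointer) and emit the remaining suffix. -/
def altStep (i : Nat) (st : List (String × Int) × List Nat × List Nat × List Nat) :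
    List (String × Int) × List Nat × List Nat × List Nat :=
  if i % 3 = 0 then
    let g' := st.2.1.dropWhile (fun p => decide (p < i))
    (st.1 ++ g'.map (fun p => ("frameshift", ((p + 3 : Nat) : Int))), g', st.2.2.1, st.2.2.2)
  else if i % 3 = 1 then
    let g' := st.2.2.1.dropWhile (fun p => decide (p < i))
    (st.1 ++ g'.map (fun p => ("frameshift", ((p + 3 : Nat) : Int))), st.2.1, g', st.2.2.2)
  else
    let g' := st.2.2.2.dropWhile (fun p => decide (p < i))
    (st.1 ++ g'.map (fun p => ("frameshift", ((p + 3 : Nat) : Int))), st.2.1, st.2.2.1, g')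

def detect_pseudogene_features_alt (sequence : String) : List (String × Int) :=
  let l := sequence.toList
  let n := l.length
  let feats := ((upto3 0 (n - 2)).filter (fun i => decide (cdn l i ∈ stopCodons))).map
      (fun (i : Nat) => (("premature_stop", (i : Int)) : String × Int))
  let atg := occurrences l ['A','T','G']
  let good := (PySem.List.sorted (atg ++ occurrences l ['G','T','G']) (fun p => p)).foldl
      (goodStep2 l n) ([], [], [])
  ((atg.foldl (fun st i => if i < n - 3 then altStep i st else st) (feats, good))).1

-- ===== PRECONDITION & SPEC =====
def Spec_detect_pseudogene_features (sequence : String) (out : List (String × Int)) : Prop := out = detect_pseudogene_features_alt sequence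
instance (sequence : String) (out : List (String × Int)) : Decidable (Spec_detect_pseudogene_features sequence out) := by unfold Spec_detect_pseudogene_features; infer_instance

-- ===== CLAIM (what is proved, stated in full; the proofs are below) =====
def Claim_equal_detect_pseudogene_features : Prop := ∀ (sequence : String), Dom_detect_pseudogene_features sequence → Spec_detect_pseudogene_features sequence (detect_pseudogene_features sequence)

-- ===== LEMMAS AND PROOFS =====

theorem mem_upto3 (a stop x : Nat) : x ∈ upto3 a stop ↔ a ≤ x ∧ x < stop ∧ (x - a) % 3 = 0 := by
  fun_induction upto3 a stop with
  | case1 a h ih => simp only [List.mem_cons, ih]; omega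
  | case2 a h => simp only [List.not_mem_nil, false_iff]; omega

theorem pairwise_upto3 (a stop : Nat) : List.Pairwise (· < ·) (upto3 a stop) := by
  fun_induction upto3 a stop with
  | case1 a h ih =>
    exact List.pairwise_cons.2 ⟨fun x hx => by have := (mem_upto3 _ _ _).1 hx; omega, ih⟩
  | case2 a h => exact List.Pairwise.nil

def condRb (s : List Char) (j : Nat) : Bool :=
  decide (cdn s j ∈ startLike ∧ cdn s (j + 3) ∉ startLike) &&
  (cdn s (j + 3)).any (fun b => decide (b ∉ ['A','T','G','C']))

theorem cfs_eq (s : List Char) :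
    check_frame_shifts s
      = ((upto3 0 (s.length - s.length % 3 - 3)).filter (condRb s)).map (· + 3) := by
  unfold check_frame_shifts
  rw [PySem.List.foldl_congr_mem _ _
      (fun shifts j => if condRb s j then shifts ++ [j + 3] else shifts) _
      (fun acc j _ => by
        simp only [condRb, Bool.and_eq_true, decide_eq_true_eq]
        split_ifs <;> tauto)]
  exact PySem.List.foldl_append_if _ _ _ _

def condAbs (l : List Char) (n p : Nat) : Bool :=
  decide (p + 6 ≤ n - (n - p) % 3 ∧ cdn l p ∈ startLike) &&
  decide (cdn l (p + 3) ∉ startLike ∧ (cdn l (p + 3)).any (fun b => decide (b ∉ ['A','T','G','C'])))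


theorem eq_of_pairwise_lt_mem (l1 l2 : List Nat) (h1 : List.Pairwise (· < ·) l1)
    (h2 : List.Pairwise (· < ·) l2) (hm : ∀ x, x ∈ l1 ↔ x ∈ l2) : l1 = l2 :=
  List.Perm.eq_of_pairwise (fun a b _ _ hab hba => by omega) h1 h2
    ((List.perm_ext_iff_of_nodup (h1.imp Nat.ne_of_lt) (h2.imp Nat.ne_of_lt)).2 hm)

theorem dropWhile_lt_of_sorted (i : Nat) (s : List Nat) (h : List.Pairwise (· < ·) s) :
    s.dropWhile (fun p => decide (p < i)) = s.filter (fun p => decide (i ≤ p)) := by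
  induction s with
  | nil => rfl
  | cons a s ih =>
    rw [List.dropWhile_cons, List.filter_cons]
    by_cases ha : a < i
    · simp only [ha, decide_true, if_true]
      rw [ih h.tail]
      simp [show ¬ i ≤ a by omega]
    · simp only [ha, decide_false, Bool.false_eq_true, if_false]
      simp only [show i ≤ a by omega, decide_true, if_true]
      rw [List.filter_eq_self.2 (fun x hx => by
        have := (List.pairwise_cons.1 h).1 x hx; simp; omega)]

theorem cdn_drop (l : List Char) (i j : Nat) : cdn (l.drop i) j = cdn l (i + j) := by
  unfold cdn
  rw [List.drop_drop]


theorem prefix_drop_infix (s sub : List Char) (k p : Nat) (hkp : k ≤ p)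
    (h : sub <+: s.drop p) : sub <:+: s.drop k := by
  obtain ⟨t, ht⟩ := h
  refine ⟨(s.drop k).take (p - k), t, ?_⟩
  have hd : s.drop p = (s.drop k).drop (p - k) := by
    rw [List.drop_drop]; congr 1; omega
  rw [List.append_assoc, ht, hd, List.take_append_drop]

theorem occLoop_spec (s sub : List Char) (hsub : sub ≠ []) :
    ∀ (fuel k : Nat), k ≤ s.length → s.length + 1 ≤ fuel + k →
    occLoop s sub (PySem.Chars.findFrom s sub (k : Int)) fuel
      = (List.range s.length).filter
          (fun p => decide (k ≤ p) && decide (sub <+: s.drop p)) := by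
  intro fuel
  induction fuel with
  | zero => intro k hk hf; omega
  | succ fuel ih =>
    intro k hk hf
    by_cases hm : PySem.Chars.findFrom s sub (k : Int) = -1
    · rw [hm]
      unfold occLoop
      rw [if_pos rfl]
      have hno := (PySem.Chars.findFrom_natCast_eq_neg_one_iff s sub k hk).1 hm
      symm
      rw [List.filter_eq_nil_iff]
      rintro p hp hcond
      simp only [Bool.and_eq_true, decide_eq_true_eq] at hcond
      exact hno (prefix_drop_infix s sub k p hcond.1 hcond.2)
    · obtain ⟨hkm, hpre, hmin⟩ := PySem.Chars.findFrom_natCast_spec s sub k hk hm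
      set m := PySem.Chars.findFrom s sub (k : Int) with hmdef
      have hm0 : (0 : Int) ≤ m := le_trans (by exact_mod_cast Int.natCast_nonneg k) hkm
      have hmn : m.toNat < s.length := by
        rcases hpre with ⟨t, ht⟩
        have hlen : sub.length + t.length = (s.drop m.toNat).length := by
          rw [← ht]; simp
        have hsublen : sub.length ≠ 0 := by
          intro hc; exact hsub (List.length_eq_zero_iff.1 hc)
        simp only [List.length_drop] at hlen
        omega
      unfold occLoop
      rw [if_neg hm]
      have hkm' : k ≤ m.toNat := by omega
      have hcast : m + 1 = ((m.toNat + 1 : Nat) : Int) := by omega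
      rw [hcast, ih (m.toNat + 1) (by omega) (by omega)]
      apply eq_of_pairwise_lt_mem
      · refine List.pairwise_cons.2 ⟨?_, List.Pairwise.sublist List.filter_sublist List.pairwise_lt_range⟩
        intro x hx
        simp only [List.mem_filter, List.mem_range, Bool.and_eq_true, decide_eq_true_eq] at hx
        omega
      · exact List.Pairwise.sublist List.filter_sublist List.pairwise_lt_range
      · intro x
        simp only [List.mem_cons, List.mem_filter, List.mem_range, Bool.and_eq_true,
          decide_eq_true_eq]
        constructor
        · rintro (rfl | ⟨hxn, hx1, hxp⟩)
          · exact ⟨hmn, hkm', hpre⟩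
          · exact ⟨hxn, by omega, hxp⟩
        · rintro ⟨hxn, hkx, hxp⟩
          by_cases hxm : x = m.toNat
          · exact Or.inl hxm
          · right
            refine ⟨hxn, ?_, hxp⟩
            by_contra hlt
            exact hmin x hkx (by omega) hxp

theorem occurrences_spec (s sub : List Char) (hsub : sub ≠ []) :
    occurrences s sub = (List.range s.length).filter (fun p => decide (sub <+: s.drop p)) := by
  unfold occurrences
  have h0 : PySem.Chars.find s sub = PySem.Chars.findFrom s sub ((0 : Nat) : Int) := by
    rw [show (((0 : Nat) : Int)) = (0 : Int) by rfl, PySem.Chars.findFrom_zero]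
  rw [h0, occLoop_spec s sub hsub (s.length + 1) 0 (by omega) (by omega)]
  exact List.filter_congr (fun p _ => by simp)

theorem prefix_iff_cdn (s : List Char) (p : Nat) (sub : List Char) (h3 : sub.length = 3) :
    sub <+: s.drop p ↔ cdn s p = sub := by
  rw [List.prefix_iff_eq_take, h3]
  unfold cdn
  exact ⟨fun h => h.symm, fun h => h.symm⟩

theorem inner_nat_eq (l : List Char) (i : Nat) :
    (check_frame_shifts (l.drop i)).map (fun pos => i + pos)
      = (((List.range l.length).filter
            (fun p => decide (p % 3 = i % 3) && condAbs l l.length p)).filter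
          (fun p => decide (i ≤ p))).map (· + 3) := by
  rw [cfs_eq, List.map_map, List.length_drop]
  apply eq_of_pairwise_lt_mem
  · exact List.pairwise_map.2
      ((List.Pairwise.sublist List.filter_sublist (pairwise_upto3 _ _)).imp
        (fun {a b} h => by simp only [Function.comp_apply]; omega))
  · exact List.pairwise_map.2
      ((List.Pairwise.sublist List.filter_sublist
        (List.Pairwise.sublist List.filter_sublist List.pairwise_lt_range)).imp
        (fun {a b} h => by omega))
  · intro x
    simp only [List.mem_map, List.mem_filter, List.mem_range, mem_upto3, Function.comp_apply,
      Bool.and_eq_true, decide_eq_true_eq]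
    constructor
    · rintro ⟨j, ⟨⟨hj0, hjlt, hj3⟩, hc⟩, rfl⟩
      simp only [condRb, Bool.and_eq_true, decide_eq_true_eq, cdn_drop] at hc
      obtain ⟨⟨hA, hB⟩, hAny⟩ := hc
      have e : i + (j + 3) = (i + j) + 3 := by omega
      rw [e] at hB hAny
      refine ⟨i + j, ⟨⟨by omega, by omega, ?_⟩, by omega⟩, by omega⟩
      simp only [condAbs, Bool.and_eq_true, decide_eq_true_eq]
      exact ⟨⟨by omega, hA⟩, hB, hAny⟩
    · rintro ⟨p, ⟨⟨hpn, hp3, hc⟩, hip⟩, rfl⟩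
      simp only [condAbs, Bool.and_eq_true, decide_eq_true_eq] at hc
      obtain ⟨⟨hbound, hA⟩, hB, hAny⟩ := hc
      refine ⟨p - i, ⟨⟨by omega, by omega, by omega⟩, ?_⟩, by omega⟩
      simp only [condRb, Bool.and_eq_true, decide_eq_true_eq, cdn_drop]
      have e1 : i + (p - i) = p := by omega
      have e2 : i + (p - i + 3) = p + 3 := by omega
      rw [e1, e2]
      exact ⟨⟨hA, hB⟩, hAny⟩


def condAbs2 (l : List Char) (n p : Nat) : Bool :=
  decide (p + 6 ≤ n - (n - p) % 3) &&
  decide (cdn l (p + 3) ∉ startLike ∧ (cdn l (p + 3)).any (fun b => decide (b ∉ ['A','T','G','C'])))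

theorem goodStep2_eq (l : List Char) (n : Nat) (g0 g1 g2 : List Nat) (p : Nat) :
    goodStep2 l n (g0, g1, g2) p =
      (g0 ++ (if decide (p % 3 = 0) && condAbs2 l n p then [p] else []),
       g1 ++ (if decide (p % 3 = 1) && condAbs2 l n p then [p] else []),
       g2 ++ (if decide (p % 3 = 2) && condAbs2 l n p then [p] else [])) := by
  have h3 : p % 3 = 0 ∨ p % 3 = 1 ∨ p % 3 = 2 := by omega
  by_cases h1 : p + 6 ≤ n - (n - p) % 3
  · by_cases h2 : (cdn l (p + 3) ∉ startLike ∧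
        (cdn l (p + 3)).any (fun b => decide (b ∉ ['A','T','G','C'])))
    · unfold goodStep2
      rw [if_pos h1, if_pos h2]
      rcases h3 with h3 | h3 | h3 <;> simp [condAbs2, h1, h2, h3] <;> simpa using h2.2
    · unfold goodStep2
      rw [if_pos h1, if_neg h2]
      have hc : decide (cdn l (p + 3) ∉ startLike ∧
          (cdn l (p + 3)).any (fun b => decide (b ∉ ['A','T','G','C']))) = false :=
        decide_eq_false h2
      have hc' : condAbs2 l n p = false := by unfold condAbs2; rw [hc]; simp
      simp [hc']
  · unfold goodStep2
    rw [if_neg h1]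
    have hc : decide (p + 6 ≤ n - (n - p) % 3) = false := decide_eq_false h1
    have hc' : condAbs2 l n p = false := by unfold condAbs2; rw [hc]; simp
    simp [hc']

theorem good_spec2 (l : List Char) (n : Nat) (li : List Nat) (g0 g1 g2 : List Nat) :
    li.foldl (goodStep2 l n) (g0, g1, g2) =
      (g0 ++ (li.filter (fun p => decide (p % 3 = 0) && condAbs2 l n p)),
       g1 ++ (li.filter (fun p => decide (p % 3 = 1) && condAbs2 l n p)),
       g2 ++ (li.filter (fun p => decide (p % 3 = 2) && condAbs2 l n p))) := by
  induction li generalizing g0 g1 g2 with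
  | nil => simp
  | cons p tl ih =>
    rw [List.foldl_cons, goodStep2_eq, ih]
    simp only [List.filter_cons]
    split_ifs <;> simp

theorem inStart_and_condAbs2 (l : List Char) (r p : Nat) :
    (decide (p % 3 = r) && condAbs2 l l.length p && decide (cdn l p ∈ startLike))
      = (decide (p % 3 = r) && condAbs l l.length p) := by
  unfold condAbs condAbs2
  by_cases h1 : cdn l p ∈ startLike <;>
    by_cases h2 : p + 6 ≤ l.length - (l.length - p) % 3 <;>
      by_cases h3 : p % 3 = r <;>
        simp [h1, h2, h3]

theorem good_classes (l : List Char) :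
    ((List.range l.length).filter (fun p => decide (cdn l p ∈ startLike))).foldl
        (goodStep2 l l.length) ([], [], []) =
      ((List.range l.length).filter (fun p => decide (p % 3 = 0) && condAbs l l.length p),
       (List.range l.length).filter (fun p => decide (p % 3 = 1) && condAbs l l.length p),
       (List.range l.length).filter (fun p => decide (p % 3 = 2) && condAbs l l.length p)) := by
  rw [good_spec2]
  simp only [List.nil_append, List.filter_filter]
  rw [List.filter_congr (fun p _ => inStart_and_condAbs2 l 0 p),
    List.filter_congr (fun p _ => inStart_and_condAbs2 l 1 p),
    List.filter_congr (fun p _ => inStart_and_condAbs2 l 2 p)]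


theorem filter_le_filter_le (g : List Nat) (i i' : Nat) (h : i ≤ i') :
    (g.filter (fun p => decide (i ≤ p))).filter (fun p => decide (i' ≤ p))
      = g.filter (fun p => decide (i' ≤ p)) := by
  rw [List.filter_filter]
  exact List.filter_congr (fun p _ => by
    by_cases hp : i' ≤ p <;> simp [hp] <;> omega)

theorem fold_alt_eq (c : Nat → Prop) [DecidablePred c] (g0 g1 g2 : List Nat)
    (hg0 : List.Pairwise (· < ·) g0) (hg1 : List.Pairwise (· < ·) g1)
    (hg2 : List.Pairwise (· < ·) g2) :
    ∀ (is : List Nat) (fs : List (String × Int)) (s0 s1 s2 : List Nat),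
    List.Pairwise (· ≤ ·) is →
    List.Pairwise (· < ·) s0 → List.Pairwise (· < ·) s1 → List.Pairwise (· < ·) s2 →
    (∀ i ∈ is, s0.filter (fun p => decide (i ≤ p)) = g0.filter (fun p => decide (i ≤ p))) →
    (∀ i ∈ is, s1.filter (fun p => decide (i ≤ p)) = g1.filter (fun p => decide (i ≤ p))) →
    (∀ i ∈ is, s2.filter (fun p => decide (i ≤ p)) = g2.filter (fun p => decide (i ≤ p))) →
    (is.foldl (fun st i => if c i then altStep i st else st) (fs, s0, s1, s2)).1
      = is.foldl (fun fs i => if c i then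
          fs ++ ((if i % 3 = 0 then g0 else if i % 3 = 1 then g1 else g2).filter
            (fun p => decide (i ≤ p))).map (fun p => (("frameshift", ((p + 3 : Nat) : Int)) : String × Int))
          else fs) fs := by
  intro is
  induction is with
  | nil => intro fs s0 s1 s2 _ _ _ _ _ _ _; rfl
  | cons i tl ih =>
    intro fs s0 s1 s2 his hp0 hp1 hp2 hf0 hf1 hf2
    have hle := (List.pairwise_cons.1 his).1
    have htl := (List.pairwise_cons.1 his).2
    by_cases hc : c i
    · have h3 : i % 3 = 0 ∨ i % 3 = 1 ∨ i % 3 = 2 := by omega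
      rcases h3 with h0 | h0 | h0
      · have hd : s0.dropWhile (fun p => decide (p < i)) = g0.filter (fun p => decide (i ≤ p)) := by
          rw [dropWhile_lt_of_sorted i s0 hp0, hf0 i (by simp)]
        simp only [List.foldl_cons, if_pos hc, altStep, h0, if_true, hd, reduceIte]
        refine ih _ _ _ _ htl (List.Pairwise.sublist List.filter_sublist hg0) hp1 hp2 ?_ ?_ ?_
        · intro i' hi'; exact filter_le_filter_le _ _ _ (hle i' hi')
        · intro i' hi'; exact hf1 i' (by simp [hi'])
        · intro i' hi'; exact hf2 i' (by simp [hi'])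
      · have hd : s1.dropWhile (fun p => decide (p < i)) = g1.filter (fun p => decide (i ≤ p)) := by
          rw [dropWhile_lt_of_sorted i s1 hp1, hf1 i (by simp)]
        simp only [List.foldl_cons, if_pos hc, altStep, h0, if_true, hd, reduceIte]
        refine ih _ _ _ _ htl hp0 (List.Pairwise.sublist List.filter_sublist hg1) hp2 ?_ ?_ ?_
        · intro i' hi'; exact hf0 i' (by simp [hi'])
        · intro i' hi'; exact filter_le_filter_le _ _ _ (hle i' hi')
        · intro i' hi'; exact hf2 i' (by simp [hi'])
      · have hd : s2.dropWhile (fun p => decide (p < i)) = g2.filter (fun p => decide (i ≤ p)) := by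
          rw [dropWhile_lt_of_sorted i s2 hp2, hf2 i (by simp)]
        simp only [List.foldl_cons, if_pos hc, altStep, h0, if_true, hd, reduceIte]
        refine ih _ _ _ _ htl hp0 hp1 (List.Pairwise.sublist List.filter_sublist hg2) ?_ ?_ ?_
        · intro i' hi'; exact hf0 i' (by simp [hi'])
        · intro i' hi'; exact hf1 i' (by simp [hi'])
        · intro i' hi'; exact filter_le_filter_le _ _ _ (hle i' hi')
    · simp only [List.foldl_cons, if_neg hc]
      exact ih fs s0 s1 s2 htl hp0 hp1 hp2
        (fun i' hi' => hf0 i' (by simp [hi'])) (fun i' hi' => hf1 i' (by simp [hi']))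
        (fun i' hi' => hf2 i' (by simp [hi']))


theorem flatMap_guard {b : Type} (c : Nat → Prop) [DecidablePred c] (f : Nat → List b)
    (li : List Nat) :
    li.flatMap (fun i => if c i then f i else []) = (li.filter (fun i => decide (c i))).flatMap f := by
  induction li with
  | nil => rfl
  | cons a tl ih =>
    simp only [List.flatMap_cons, List.filter_cons]
    by_cases h : c a <;> simp [h, ih]

theorem foldl_guard_append {b : Type} (c : Nat → Prop) [DecidablePred c] (f : Nat → List b)
    (li : List Nat) (acc : List b) :
    li.foldl (fun acc i => if c i then acc ++ f i else acc) acc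
      = acc ++ (li.filter (fun i => decide (c i))).flatMap f := by
  rw [PySem.List.foldl_congr_mem _ _ (fun acc i => acc ++ (if c i then f i else [])) _
      (fun a x _ => by by_cases h : c x <;> simp [h]),
    PySem.List.foldl_append_eq_flatMap, flatMap_guard]

theorem contrib_eq (l : List Char) (i : Nat) :
    (check_frame_shifts (l.drop i)).map
        (fun pos => (("frameshift", ((i + pos : Nat) : Int)) : String × Int))
      = ((if i % 3 = 0 then (List.range l.length).filter (fun p => decide (p % 3 = 0) && condAbs l l.length p)
          else if i % 3 = 1 then (List.range l.length).filter (fun p => decide (p % 3 = 1) && condAbs l l.length p)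
          else (List.range l.length).filter (fun p => decide (p % 3 = 2) && condAbs l l.length p)).filter
            (fun p => decide (i ≤ p))).map
          (fun p => (("frameshift", ((p + 3 : Nat) : Int)) : String × Int)) := by
  have e1 : (check_frame_shifts (l.drop i)).map
      (fun pos => (("frameshift", ((i + pos : Nat) : Int)) : String × Int))
      = ((check_frame_shifts (l.drop i)).map (fun pos => i + pos)).map
          (fun q => (("frameshift", ((q : Nat) : Int)) : String × Int)) := by
    rw [List.map_map]; rfl
  rw [e1, inner_nat_eq, List.map_map]
  have h3 : i % 3 = 0 ∨ i % 3 = 1 ∨ i % 3 = 2 := by omega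
  rcases h3 with h0 | h0 | h0 <;> simp only [h0] <;> rfl


-- ===== VERDICT (by name: the statement is the Claim_ definition above) =====

theorem detect_pseudogene_features_spec : Claim_equal_detect_pseudogene_features := by
  intro sequence _
  unfold Spec_detect_pseudogene_features detect_pseudogene_features detect_pseudogene_features_alt
  dsimp only
  set l := sequence.toList with hldef
  rw [PySem.List.foldl_congr_mem (upto3 0 (l.length - 2)) _
      (fun fs i => if decide (cdn l i ∈ stopCodons) = true then
        fs ++ [(("premature_stop", (i : Int)) : String × Int)] else fs) []
      (fun acc x _ => by by_cases h : cdn l x ∈ stopCodons <;> simp [h]),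
    PySem.List.foldl_append_if]
  simp only [List.nil_append]
  have hatg : occurrences l ['A','T','G']
      = (List.range l.length).filter (fun p => decide (cdn l p = ['A','T','G'])) := by
    rw [occurrences_spec l _ (by simp)]
    exact List.filter_congr (fun p _ => by
      rw [decide_eq_decide]; exact prefix_iff_cdn l p _ (by rfl))
  have hgtg : occurrences l ['G','T','G']
      = (List.range l.length).filter (fun p => decide (cdn l p = ['G','T','G'])) := by
    rw [occurrences_spec l _ (by simp)]
    exact List.filter_congr (fun p _ => by
      rw [decide_eq_decide]; exact prefix_iff_cdn l p _ (by rfl))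
  rw [hatg, hgtg]
  have hmerged : PySem.List.sorted
      ((List.range l.length).filter (fun p => decide (cdn l p = ['A','T','G']))
        ++ (List.range l.length).filter (fun p => decide (cdn l p = ['G','T','G']))) (fun p => p)
      = (List.range l.length).filter (fun p => decide (cdn l p ∈ startLike)) := by
    apply PySem.List.sorted_eq_of_perm_of_pairwise_lt
    · refine (List.perm_ext_iff_of_nodup
        ((List.Pairwise.sublist List.filter_sublist List.pairwise_lt_range).imp Nat.ne_of_lt)
        (List.Nodup.append
          ((List.Pairwise.sublist List.filter_sublist List.pairwise_lt_range).imp Nat.ne_of_lt)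
          ((List.Pairwise.sublist List.filter_sublist List.pairwise_lt_range).imp Nat.ne_of_lt)
          ?_)).2 ?_
      · intro p hp hq
        simp only [List.mem_filter, decide_eq_true_eq] at hp hq
        have := hp.2.symm.trans hq.2
        simp at this
      · intro x
        simp only [List.mem_append, List.mem_filter, List.mem_range, decide_eq_true_eq, startLike,
          List.mem_cons, List.not_mem_nil, or_false]
        tauto
    · exact (List.Pairwise.sublist List.filter_sublist List.pairwise_lt_range).imp (fun h => h)
  rw [hmerged, good_classes l]
  rw [fold_alt_eq (fun i => i < l.length - 3) _ _ _
      (List.Pairwise.sublist List.filter_sublist List.pairwise_lt_range)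
      (List.Pairwise.sublist List.filter_sublist List.pairwise_lt_range)
      (List.Pairwise.sublist List.filter_sublist List.pairwise_lt_range)
      _ _ _ _ _
      ((List.Pairwise.sublist List.filter_sublist List.pairwise_lt_range).imp Nat.le_of_lt)
      (List.Pairwise.sublist List.filter_sublist List.pairwise_lt_range)
      (List.Pairwise.sublist List.filter_sublist List.pairwise_lt_range)
      (List.Pairwise.sublist List.filter_sublist List.pairwise_lt_range)
      (fun _ _ => rfl) (fun _ _ => rfl) (fun _ _ => rfl)]
  rw [foldl_guard_append (fun i => cdn l i ∈ [['A','T','G']]) _ (List.range (l.length - 3)),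
    foldl_guard_append (fun i => i < l.length - 3) _ _]
  congr 1
  have hlist : (((List.range l.length).filter
        (fun p => decide (cdn l p = ['A','T','G']))).filter
          (fun i => decide (i < l.length - 3)))
      = ((List.range (l.length - 3)).filter (fun i => decide (cdn l i ∈ [['A','T','G']]))) := by
    apply eq_of_pairwise_lt_mem
    · exact List.Pairwise.sublist List.filter_sublist
        (List.Pairwise.sublist List.filter_sublist List.pairwise_lt_range)
    · exact List.Pairwise.sublist List.filter_sublist List.pairwise_lt_range
    · intro x
      simp only [List.mem_filter, List.mem_range, decide_eq_true_eq, List.mem_cons,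
        List.not_mem_nil, or_false]
      constructor
      · rintro ⟨⟨hxn, hc⟩, hx3⟩; exact ⟨hx3, hc⟩
      · rintro ⟨hx3, hc⟩; exact ⟨⟨by omega, hc⟩, hx3⟩
  rw [hlist]
  exact List.flatMap_congr (fun i _ => contrib_eq l i)
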